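-- pv_equiv track=rewrite | github.com/DarkerNemesis14/Project_Crypto | src/crypto.py | __create_digrams
-- ===== SOURCE A (Python) =====
-- def __create_digrams(text: str) -> list:
--     digram = []
--     i = 0
--     while i < len(text):
--         first = text[i]
--         second = text[i+1] if i+1 < len(text) else "X"
--         digram.append(first + ("X" if first==second else second))
--         i += 1 if first==second else 2
--     return digram
-- ===== SOURCE B (Python) =====
-- def __create_digrams(text: str) -> list:
--     # Expansion pass: build a flat char buffer, inserting 'X' before a char that
--     # would duplicate its pair partner, then pad to even length; chunking pass pairs them up.
--     buf = []
--     for c in text: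
--         if len(buf) % 2 == 1 and buf[-1] == c:
--             buf.append('X')
--         buf.append(c)
--     if len(buf) % 2 == 1:
--         buf.append('X')
--     it = iter(buf)
--     return [a + b for a, b in zip(it, it)]
-- ===== Notes on version B (the rewrite author's own statement) =====
-- stated objective: alternative
-- what changed: Replaces A's variable-stride index walk (i advancing by 1 or 2 while pairing on the fly) with two passes: an expansion pass building a flat char buffer with parity-driven 'X' insertion and padding, then a chunking pass zipping the buffer into pairs.
import Mathlib
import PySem

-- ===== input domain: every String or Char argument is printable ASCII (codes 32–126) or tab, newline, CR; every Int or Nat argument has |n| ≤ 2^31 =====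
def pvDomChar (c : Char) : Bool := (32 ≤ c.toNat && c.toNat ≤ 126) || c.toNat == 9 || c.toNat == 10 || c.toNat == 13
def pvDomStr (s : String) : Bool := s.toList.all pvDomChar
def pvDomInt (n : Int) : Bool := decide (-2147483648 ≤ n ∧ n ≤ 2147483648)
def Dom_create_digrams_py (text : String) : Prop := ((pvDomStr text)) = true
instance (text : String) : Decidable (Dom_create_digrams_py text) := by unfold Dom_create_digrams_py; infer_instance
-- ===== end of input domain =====

-- B rebuilds the digrams in two passes (flat char buffer with parity-driven 'X' insertion, then pair chunking) instead of A's variable-stride index walk; objective: alternative decomposition, same cost.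


-- ===== PORT A =====
-- the while loop over index i (i += 1 when first==second else 2); text[i] is in range under the loop guard
def aLoop (cs : List Char) (i : Nat) (acc : List String) : List String :=
  if h : i < cs.length then
    let first := cs[i]
    let second := if h2 : i + 1 < cs.length then cs[i+1] else 'X'
    aLoop cs (if first = second then i + 1 else i + 2)
      (acc ++ [String.ofList [first, if first = second then 'X' else second]])
  else acc
termination_by cs.length - i
decreasing_by
  all_goals repeat' split
  all_goals omega

def create_digrams_py (text : String) : List String := aLoop text.toList 0 []

-- ===== PORT B =====
-- one iteration of B's for-loop: buf[-1] is defined whenever len(buf) is odd, so buf.getLast? = some c is exact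
def bStep (buf : List Char) (c : Char) : List Char :=
  (if buf.length % 2 = 1 ∧ buf.getLast? = some c then buf ++ ['X'] else buf) ++ [c]

-- zip(it, it) on one iterator pairs consecutive elements, dropping a lone leftover: exactly this recursion
def chunk2 : List Char → List String
  | a :: b :: r => String.ofList [a, b] :: chunk2 r
  | _ => []

def create_digrams_py_alt (text : String) : List String :=
  let buf := text.toList.foldl bStep []
  let buf2 := if buf.length % 2 = 1 then buf ++ ['X'] else buf
  chunk2 buf2

-- ===== PRECONDITION & SPEC =====
def Spec_create_digrams_py (text : String) (out : List String) : Prop := out = create_digrams_py_alt text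
instance (text : String) (out : List String) : Decidable (Spec_create_digrams_py text out) := by unfold Spec_create_digrams_py; infer_instance

-- ===== CLAIM (what is proved, stated in full; the proofs are below) =====
def Claim_equal_create_digrams_py : Prop := ∀ (text : String), Dom_create_digrams_py text → Spec_create_digrams_py text (create_digrams_py text)

-- ===== LEMMAS AND PROOFS =====

-- reference digram recursion both ports are reduced to
def refDi : List Char → List String
  | [] => []
  | [a] => [String.ofList [a, 'X']]
  | a :: b :: r => if a = b then String.ofList [a, 'X'] :: refDi (b :: r) else String.ofList [a, b] :: refDi r

-- B's expansion pass, as a recursion on the text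
def expand : List Char → List Char
  | [] => []
  | [a] => [a]
  | a :: b :: r => if a = b then a :: 'X' :: expand (b :: r) else a :: b :: expand r

def pad (xs : List Char) : List Char := if xs.length % 2 = 1 then xs ++ ['X'] else xs

theorem aLoop_eq (n : Nat) : ∀ (cs : List Char) (i : Nat) (acc : List String),
    cs.length - i ≤ n → aLoop cs i acc = acc ++ refDi (cs.drop i) := by
  induction n with
  | zero =>
    intro cs i acc h
    rw [aLoop, dif_neg (by omega)]
    simp [List.drop_eq_nil_of_le (by omega : cs.length ≤ i), refDi]
  | succ n ih =>
    intro cs i acc h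
    rw [aLoop]
    by_cases hlt : i < cs.length
    · rw [dif_pos hlt]
      have hdrop : cs.drop i = cs[i] :: cs.drop (i + 1) := List.drop_eq_getElem_cons hlt
      by_cases h2 : i + 1 < cs.length
      · have hdrop2 : cs.drop (i + 1) = cs[i+1] :: cs.drop (i + 2) := List.drop_eq_getElem_cons h2
        simp only [dif_pos h2]
        by_cases he : cs[i] = cs[i+1]
        · rw [if_pos he, if_pos he, ih cs (i+1) _ (by omega), hdrop, hdrop2]
          simp [refDi, he]
        · rw [if_neg he, if_neg he, ih cs (i+2) _ (by omega), hdrop, hdrop2]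
          simp [refDi, he]
      · -- last character: second is the sentinel 'X'; either way the appended pair is [cs[i], 'X']
        have hdrop2 : cs.drop (i + 1) = [] := List.drop_eq_nil_of_le (by omega)
        have hdrop3 : cs.drop (i + 2) = [] := List.drop_eq_nil_of_le (by omega)
        simp only [dif_neg h2]
        by_cases he : cs[i] = 'X'
        · rw [if_pos he, if_pos he, ih cs (i+1) _ (by omega), hdrop, hdrop2]
          simp [refDi, he]
        · rw [if_neg he, if_neg he, ih cs (i+2) _ (by omega), hdrop, hdrop2, hdrop3]
          simp [refDi]
    · rw [dif_neg hlt]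
      simp [List.drop_eq_nil_of_le (by omega : cs.length ≤ i), refDi]

theorem foldl_bStep_eq : ∀ (cs : List Char) (buf : List Char), buf.length % 2 = 0 →
    cs.foldl bStep buf = buf ++ expand cs := by
  intro cs
  induction cs using expand.induct with
  | case1 => intro buf _; simp [expand]
  | case2 a =>
    intro buf hev
    simp [bStep, expand, hev]
  | case3 a r ih =>
    intro buf hev
    have hs1 : bStep buf a = buf ++ [a] := by simp [bStep, hev]
    have hs2 : bStep (buf ++ [a]) a = buf ++ [a, 'X'] ++ [a] := by
      simp [bStep, Nat.add_mod, hev]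
    have hIH := ih (buf ++ [a, 'X']) (by simp [Nat.add_mod, hev])
    rw [List.foldl_cons] at hIH
    have hs3 : bStep (buf ++ [a, 'X']) a = buf ++ [a, 'X'] ++ [a] := by
      simp [bStep, Nat.add_mod, hev]
    rw [hs3] at hIH
    rw [List.foldl_cons, List.foldl_cons, hs1, hs2, hIH]
    simp [expand]
  | case4 a b r hab ih =>
    intro buf hev
    have hs1 : bStep buf a = buf ++ [a] := by simp [bStep, hev]
    have hs2 : bStep (buf ++ [a]) b = buf ++ [a, b] := by
      simp [bStep, Nat.add_mod, hev, hab]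
    rw [List.foldl_cons, List.foldl_cons, hs1, hs2,
      ih (buf ++ [a, b]) (by simp [Nat.add_mod, hev])]
    simp [expand, hab]

theorem pad_cons_cons (x y : Char) (t : List Char) : pad (x :: y :: t) = x :: y :: pad t := by
  unfold pad
  by_cases h : t.length % 2 = 1
  · rw [if_pos (show (x :: y :: t).length % 2 = 1 by simp; omega), if_pos h]
    simp
  · rw [if_neg (show ¬(x :: y :: t).length % 2 = 1 by simp; omega), if_neg h]

theorem chunk2_pad_expand : ∀ cs : List Char, chunk2 (pad (expand cs)) = refDi cs := by
  intro cs
  induction cs using expand.induct with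
  | case1 => simp [expand, pad, refDi, chunk2]
  | case2 a => simp [expand, pad, refDi, chunk2]
  | case3 a r ih =>
    have h1 : expand (a :: a :: r) = a :: 'X' :: expand (a :: r) := by simp [expand]
    have h2 : refDi (a :: a :: r) = String.ofList [a, 'X'] :: refDi (a :: r) := by simp [refDi]
    rw [h1, pad_cons_cons, chunk2, ih, h2]
  | case4 a b r hab ih =>
    have h1 : expand (a :: b :: r) = a :: b :: expand r := by simp [expand, hab]
    have h2 : refDi (a :: b :: r) = String.ofList [a, b] :: refDi r := by simp [refDi, hab]
    rw [h1, pad_cons_cons, chunk2, ih, h2]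

-- ===== VERDICT (by name: the statement is the Claim_ definition above) =====
theorem create_digrams_py_spec : Claim_equal_create_digrams_py := by
  intro text _
  show create_digrams_py text = create_digrams_py_alt text
  rw [create_digrams_py, aLoop_eq text.toList.length text.toList 0 [] (by omega)]
  simp only [List.nil_append, List.drop_zero, create_digrams_py_alt]
  rw [foldl_bStep_eq text.toList [] rfl]
  simp only [List.nil_append]
  exact (chunk2_pad_expand text.toList).symm
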